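-- pv_equiv track=rewrite | github.com/SymbolZH/learn | test.py | f
-- ===== SOURCE A (Python) =====
-- def f(data):
--     block_size = 512
--
--     #展平数据
--     input_ids = []
--     for i in data['input_ids']:
--         input_ids.extend(i)
--
--     #切断数据
--     data = {'input_ids': [], 'attention_mask': []}
--     for i in range(len(input_ids) // block_size):
--         block = input_ids[i * block_size:i * block_size + block_size]
--         data['input_ids'].append(block)
--         data['attention_mask'].append([1] * block_size)
--
--     #设置labels
--     data['labels'] = data['input_ids'].copy()
--
--     return data
-- ===== SOURCE B (Python) =====
-- def f(data):
--     block_size = 512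
--     out_ids = []
--     masks = []
--     buf = []
--     for sub in data['input_ids']:
--         buf += sub
--         while len(buf) >= block_size:
--             out_ids.append(buf[:block_size])
--             masks.append([1] * block_size)
--             buf = buf[block_size:]
--     return {'input_ids': out_ids, 'attention_mask': masks, 'labels': list(out_ids)}
-- ===== Notes on version B (the rewrite author's own statement) =====
-- stated objective: alternative
-- what changed: Replaces flatten-everything-then-slice-by-index-ranges with a single streaming pass that keeps a buffer and emits each full 512-token block (and its all-ones mask) as the sublists are traversed.
import Mathlib
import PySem

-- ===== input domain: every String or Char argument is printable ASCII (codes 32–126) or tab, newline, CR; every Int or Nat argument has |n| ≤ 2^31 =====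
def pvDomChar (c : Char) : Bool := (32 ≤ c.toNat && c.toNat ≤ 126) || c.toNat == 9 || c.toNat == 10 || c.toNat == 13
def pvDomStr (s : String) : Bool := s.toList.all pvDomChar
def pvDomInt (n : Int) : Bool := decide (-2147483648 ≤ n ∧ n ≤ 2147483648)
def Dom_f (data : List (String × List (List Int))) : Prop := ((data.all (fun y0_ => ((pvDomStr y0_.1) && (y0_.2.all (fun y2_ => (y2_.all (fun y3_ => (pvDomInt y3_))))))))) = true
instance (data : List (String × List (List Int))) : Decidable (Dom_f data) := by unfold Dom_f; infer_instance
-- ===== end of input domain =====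

-- B chunks the token ids in a single streaming pass (buffer + emit full 512-blocks as the sublists
-- are traversed) instead of materializing the flat list and then slicing it by index ranges;
-- alternative decomposition, same result.

-- shared helper: data['input_ids'] — first-match lookup in the association list (missing key → none)
def pvLookup : List (String × List (List Int)) → Option (List (List Int))
  | [] => none
  | (k, v) :: t => if k == "input_ids" then some v else pvLookup t

-- ===== PORT A =====
def f (data : List (String × List (List Int))) : List (String × List (List Int)) :=
  -- input_ids = []; for i in data['input_ids']: input_ids.extend(i)
  let input_ids : List Int := ((pvLookup data).getD []).foldl (fun acc i => acc ++ i) []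
  -- data = {'input_ids': [], 'attention_mask': []}
  let d0 : PySem.Dict String (List (List Int)) :=
    PySem.Dict.ofList [("input_ids", []), ("attention_mask", [])]
  -- for i in range(len(input_ids) // 512): block = input_ids[i*512:i*512+512]; append block / [1]*512
  let d := (PySem.List.pyRange 0 (PySem.Int.floordiv (input_ids.length : Int) 512) 1).foldl
    (fun d i =>
      (d.modify "input_ids" []
          (· ++ [PySem.List.slice input_ids (some (i * 512)) (some (i * 512 + 512))])).modify
        "attention_mask" [] (· ++ [List.replicate 512 (1 : Int)])) d0
  -- data['labels'] = data['input_ids'].copy(); return data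
  (d.insert "labels" (d.getD "input_ids" [])).items

-- ===== PORT B =====
-- while len(buf) >= 512: out_ids.append(buf[:512]); masks.append([1]*512); buf = buf[512:]
def pvDrain : List (List Int) → List (List Int) → List Int →
    List (List Int) × List (List Int) × List Int
  | ids, masks, buf =>
    if 512 ≤ buf.length then
      pvDrain (ids ++ [buf.take 512]) (masks ++ [List.replicate 512 (1 : Int)]) (buf.drop 512)
    else
      (ids, masks, buf)
  termination_by _ _ buf => buf.length
  decreasing_by simp; omega

def f_alt (data : List (String × List (List Int))) : List (String × List (List Int)) :=
  -- for sub in data['input_ids']: buf += sub; drain full blocks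
  let st := ((pvLookup data).getD []).foldl
    (fun st sub => pvDrain st.1 st.2.1 (st.2.2 ++ sub)) ([], [], [])
  [("input_ids", st.1), ("attention_mask", st.2.1), ("labels", st.1)]

-- ===== PRECONDITION & SPEC =====
-- A raises KeyError when the key "input_ids" is absent; exactly those inputs are excluded.
def Pre_f (data : List (String × List (List Int))) : Prop :=
  data.any (fun p => p.1 == "input_ids") = true
instance (data : List (String × List (List Int))) : Decidable (Pre_f data) := by
  unfold Pre_f; infer_instance

def pvWitness_f : (List (String × List (List Int))) := [("input_ids", [[1, 2], [3]])]

def Spec_f (data : List (String × List (List Int))) (out : List (String × List (List Int))) : Prop := out = f_alt data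
instance (data : List (String × List (List Int))) (out : List (String × List (List Int))) : Decidable (Spec_f data out) := by unfold Spec_f; infer_instance

-- ===== CLAIM (what is proved, stated in full; the proofs are below) =====
def Claim_equal_f : Prop := ∀ (data : List (String × List (List Int))), Dom_f data → Pre_f data → Spec_f data (f data)

-- ===== LEMMAS AND PROOFS =====

-- the blocks of a flat list: the first n slices of width 512
def pvChunk (n : Nat) (flat : List Int) : List (List Int) :=
  (List.range n).map (fun k => (flat.drop (k * 512)).take 512)

theorem pvChunk_step (buf : List Int) (h : 512 ≤ buf.length) :
    pvChunk (buf.length / 512) buf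
      = buf.take 512 :: pvChunk ((buf.drop 512).length / 512) (buf.drop 512) := by
  have hn : buf.length / 512 = (buf.drop 512).length / 512 + 1 := by
    simp [List.length_drop]; omega
  rw [hn]
  unfold pvChunk
  rw [List.range_succ_eq_map]
  simp [List.map_map, Function.comp_def, List.drop_drop]
  intro a _
  have h2 : (a + 1) * 512 = 512 + a * 512 := by ring
  rw [h2]

theorem pvDrain_eq (ids masks : List (List Int)) (buf : List Int) :
    pvDrain ids masks buf
      = (ids ++ pvChunk (buf.length / 512) buf,
         masks ++ List.replicate (buf.length / 512) (List.replicate 512 (1 : Int)),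
         buf.drop (512 * (buf.length / 512))) := by
  fun_induction pvDrain ids masks buf with
  | case1 ids masks buf h ih =>
    rw [ih]
    have hl : (List.drop 512 buf).length = buf.length - 512 := by simp
    have hn : buf.length / 512 = (List.drop 512 buf).length / 512 + 1 := by
      rw [hl]; omega
    rw [pvChunk_step buf h]
    simp only [hn, hl, Prod.mk.injEq]
    refine ⟨by rw [List.append_assoc]; rfl, by rw [List.append_assoc, List.replicate_succ]; rfl, ?_⟩
    rw [List.drop_drop]
    congr 1
    omega
  | case2 ids masks buf h =>
    have hn : buf.length / 512 = 0 := by omega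
    simp [pvChunk, hn]

theorem pvDrain_absorb (buf : List Int) (ids masks : List (List Int)) (x : List Int) :
    pvDrain (pvDrain ids masks buf).1 (pvDrain ids masks buf).2.1
        ((pvDrain ids masks buf).2.2 ++ x)
      = pvDrain ids masks (buf ++ x) := by
  fun_induction pvDrain ids masks buf with
  | case1 ids masks buf h ih =>
    rw [ih]
    have h2 : 512 ≤ (buf ++ x).length := by simp; omega
    conv_rhs => rw [pvDrain]
    rw [if_pos h2, List.take_append_of_le_length h, List.drop_append_of_le_length h]
  | case2 ids masks buf h =>
    rfl

theorem pvFoldl_drain (subs : List (List Int)) :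
    ∀ (ids masks : List (List Int)) (buf : List Int), buf.length < 512 →
      subs.foldl (fun st sub => pvDrain st.1 st.2.1 (st.2.2 ++ sub)) (ids, masks, buf)
        = pvDrain ids masks (buf ++ subs.flatten) := by
  induction subs with
  | nil =>
    intro ids masks buf h
    simp only [List.foldl_nil, List.flatten_nil, List.append_nil]
    rw [pvDrain, if_neg (by omega)]
  | cons s t ih =>
    intro ids masks buf h
    simp only [List.foldl_cons, List.flatten_cons]
    rcases hd : pvDrain ids masks (buf ++ s) with ⟨a, b, c⟩
    have hc : c.length < 512 := by
      have := pvDrain_eq ids masks (buf ++ s)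
      rw [hd] at this
      have hc2 : c = (buf ++ s).drop (512 * ((buf ++ s).length / 512)) :=
        congrArg (fun p => p.2.2) this
      rw [hc2]; simp; omega
    calc t.foldl (fun st sub => pvDrain st.1 st.2.1 (st.2.2 ++ sub)) (a, b, c)
        = pvDrain a b (c ++ t.flatten) := ih a b c hc
      _ = _ := by
          have := pvDrain_absorb (buf ++ s) ids masks t.flatten
          rw [hd] at this
          simpa [List.append_assoc] using this

set_option maxRecDepth 10000 in
theorem pvLoopA (flat : List Int) (n : Nat) :
    ∀ (ids masks : List (List Int)),
      (PySem.List.pyRange 0 (n : Int) 1).foldl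
        (fun d i =>
          (d.modify "input_ids" []
              (· ++ [PySem.List.slice flat (some (i * 512)) (some (i * 512 + 512))])).modify
            "attention_mask" [] (· ++ [List.replicate 512 (1 : Int)]))
        (PySem.Dict.mk [("input_ids", ids), ("attention_mask", masks)])
      = PySem.Dict.mk [("input_ids", ids ++ pvChunk n flat),
                       ("attention_mask", masks ++ List.replicate n (List.replicate 512 (1 : Int)))] := by
  induction n with
  | zero =>
    intro ids masks
    rw [show ((0 : Nat) : Int) = 0 by rfl, PySem.List.pyRange_one_eq_nil le_rfl]
    simp [pvChunk]
  | succ n ih =>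
    intro ids masks
    have hsplit : PySem.List.pyRange 0 ((n : Int) + 1) 1
        = PySem.List.pyRange 0 (n : Int) 1 ++ [(n : Int)] :=
      PySem.List.pyRange_one_succ_right (by positivity)
    rw [show (((n + 1 : Nat)) : Int) = (n : Int) + 1 by push_cast; ring, hsplit,
      List.foldl_append, ih ids masks]
    simp only [List.foldl_cons, List.foldl_nil]
    rw [show ((n : Int) * 512) = ((n * 512 : Nat) : Int) by push_cast; ring,
      show (((n * 512 : Nat) : Int) + 512) = ((n * 512 + 512 : Nat) : Int) by push_cast; ring,
      PySem.List.slice_natCast]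
    simp [PySem.Dict.modify, PySem.Dict.insert, PySem.Dict.getD, PySem.Dict.get?,
      PySem.Dict.contains, pvChunk, List.range_succ, List.replicate_succ']

set_option maxRecDepth 10000 in
theorem f_char (data : List (String × List (List Int))) :
    f data
      = [("input_ids", pvChunk ((((pvLookup data).getD []).flatten.length) / 512) ((pvLookup data).getD []).flatten),
         ("attention_mask", List.replicate ((((pvLookup data).getD []).flatten.length) / 512) (List.replicate 512 (1 : Int))),
         ("labels", pvChunk ((((pvLookup data).getD []).flatten.length) / 512) ((pvLookup data).getD []).flatten)] := by
  have hflat : ((pvLookup data).getD []).foldl (fun acc i => acc ++ i) ([] : List Int)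
      = ((pvLookup data).getD []).flatten := by
    simpa using PySem.List.foldl_append_eq_flatten ((pvLookup data).getD []) ([] : List Int)
  have hdiv : PySem.Int.floordiv ((((pvLookup data).getD []).flatten.length : Nat) : Int) 512
      = (((((pvLookup data).getD []).flatten.length / 512 : Nat)) : Int) := by
    exact_mod_cast PySem.Int.floordiv_natCast (((pvLookup data).getD []).flatten.length) 512
  have hof : (PySem.Dict.ofList [("input_ids", ([] : List (List Int))), ("attention_mask", [])])
      = PySem.Dict.mk [("input_ids", ([] : List (List Int))), ("attention_mask", [])] := rfl
  simp only [f, hflat, hdiv, hof, pvLoopA, List.nil_append]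
  simp [PySem.Dict.insert, PySem.Dict.getD, PySem.Dict.get?, PySem.Dict.contains]

theorem f_alt_char (data : List (String × List (List Int))) :
    f_alt data
      = [("input_ids", pvChunk ((((pvLookup data).getD []).flatten.length) / 512) ((pvLookup data).getD []).flatten),
         ("attention_mask", List.replicate ((((pvLookup data).getD []).flatten.length) / 512) (List.replicate 512 (1 : Int))),
         ("labels", pvChunk ((((pvLookup data).getD []).flatten.length) / 512) ((pvLookup data).getD []).flatten)] := by
  simp only [f_alt]
  rw [pvFoldl_drain ((pvLookup data).getD []) [] [] [] (by simp), List.nil_append,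
    pvDrain_eq]
  rfl

-- ===== VERDICT (by name: the statement is the Claim_ definition above) =====
theorem f_spec : Claim_equal_f := by
  intro data _ _
  unfold Spec_f
  rw [f_char, f_alt_char]
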